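-- pv_equiv track=rewrite | github.com/HKU-BAL/Clair3 | clair3/CallVariants.py | insertion_bases_using_alt_info_from
-- ===== SOURCE A (Python) =====
-- def insertion_bases_using_alt_info_from(
--         alt_info_dict,
--         propose_insertion_length=None,
--         minimum_insertion_length=1,
--         maximum_insertion_length=50,
--         insertion_bases_to_ignore="",
--         return_multi=False
-- ):
--     """
--     get insertion base using altnertive information in bam alignment file.
--     alt_info_dict: dictionary (XID: count), include snp, insertion, deletion type and read count.
--     propose_insertion_length: if set, only return insertion length which match propose insertion length.
--     minimum_insertion_length: if set, only return insertion length which is larger than specific insertion length.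
--     maximum_insertion_length: if set, only return insertion which is shorter than specific insertion length,
--     we will always only return insertion length shorter than 50bp by default.
--     insertion_bases_to_ignore: for multi alleic insertion variants, set the insertion bases to be ignored.
--     """
--
--     if propose_insertion_length:
--         propose_insertion_length += 1  # include reference base
--     if not len(alt_info_dict): return ""
--     insertion_bases_dict = {}
--     propose_insertion_bases_dict = {}
--     for raw_key, items in alt_info_dict.items():
--         if raw_key[0] != 'I': continue
--         key = raw_key[1:]  # remove first cigar +-X and reference_base
--         if propose_insertion_length and len(key) == propose_insertion_length and key != insertion_bases_to_ignore:
--             propose_insertion_bases_dict[key] = items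
--         elif minimum_insertion_length <= len(key) <= maximum_insertion_length and key != insertion_bases_to_ignore:
--             insertion_bases_dict[key] = items
--
--     if propose_insertion_length and len(propose_insertion_bases_dict):
--         return max(propose_insertion_bases_dict, key=propose_insertion_bases_dict.get) if len(
--             propose_insertion_bases_dict) > 0 else ""
--     if return_multi:
--         insertion_bases_list = list(insertion_bases_dict.items())
--         insertion_bases_list = [item[0] for item in sorted(insertion_bases_list, key=lambda x: x[1])[::-1]]
--         return insertion_bases_list[:2] if len(insertion_bases_list) else ""
--
--     return max(insertion_bases_dict, key=insertion_bases_dict.get) if len(insertion_bases_dict) > 0 else ""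
-- ===== SOURCE B (Python) =====
-- def insertion_bases_using_alt_info_from(
--         alt_info_dict,
--         propose_insertion_length=None,
--         minimum_insertion_length=1,
--         maximum_insertion_length=50,
--         insertion_bases_to_ignore="",
--         return_multi=False
-- ):
--     # One pass, no intermediate dicts: keep running winners (strict '>' so the
--     # first-seen maximum wins, like max(..., key=dict.get)) and a running top-two
--     # list for the multi case (count descending, ties later-seen first, matching
--     # sorted(..., key=value)[::-1]).
--     target = propose_insertion_length + 1 if propose_insertion_length else None
--     best_propose = None
--     best = None
--     top_two = []
--     for raw_key, count in alt_info_dict.items():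
--         if not raw_key.startswith('I'):
--             continue
--         key = raw_key[1:]
--         if key == insertion_bases_to_ignore:
--             continue
--         if target and len(key) == target:
--             if best_propose is None or count > best_propose[1]:
--                 best_propose = (key, count)
--         elif minimum_insertion_length <= len(key) <= maximum_insertion_length:
--             if best is None or count > best[1]:
--                 best = (key, count)
--             i = 0
--             while i < len(top_two) and count < top_two[i][1]:
--                 i += 1
--             top_two.insert(i, (key, count))
--             del top_two[2:]
--     if best_propose is not None:
--         return best_propose[0]
--     if return_multi:
--         return [k for k, _ in top_two] if top_two else ""
--     return best[0] if best is not None else ""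
-- ===== Notes on version B (the rewrite author's own statement) =====
-- stated objective: simpler
-- what changed: B replaces A's two intermediate dicts plus the max(dict, key=dict.get) / sorted-and-reverse post-passes by a single pass over alt_info_dict that keeps running winners with strict '>' (so the first-seen maximum wins) and a running size-2 top-two list; B reproduces A everywhere, including the return_multi list (the cites show identical lists), but that list lies outside the str return type the Lean claim is typed at, so Pre_ must exclude exactly those inputs.
-- outside the precondition, e.g. on insertion_bases_using_alt_info_from({'IAA': 3, 'IC': 1}, None, 1, 50, '', True): A returns ['AA', 'C'], B returns ['AA', 'C']
import Mathlib
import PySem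

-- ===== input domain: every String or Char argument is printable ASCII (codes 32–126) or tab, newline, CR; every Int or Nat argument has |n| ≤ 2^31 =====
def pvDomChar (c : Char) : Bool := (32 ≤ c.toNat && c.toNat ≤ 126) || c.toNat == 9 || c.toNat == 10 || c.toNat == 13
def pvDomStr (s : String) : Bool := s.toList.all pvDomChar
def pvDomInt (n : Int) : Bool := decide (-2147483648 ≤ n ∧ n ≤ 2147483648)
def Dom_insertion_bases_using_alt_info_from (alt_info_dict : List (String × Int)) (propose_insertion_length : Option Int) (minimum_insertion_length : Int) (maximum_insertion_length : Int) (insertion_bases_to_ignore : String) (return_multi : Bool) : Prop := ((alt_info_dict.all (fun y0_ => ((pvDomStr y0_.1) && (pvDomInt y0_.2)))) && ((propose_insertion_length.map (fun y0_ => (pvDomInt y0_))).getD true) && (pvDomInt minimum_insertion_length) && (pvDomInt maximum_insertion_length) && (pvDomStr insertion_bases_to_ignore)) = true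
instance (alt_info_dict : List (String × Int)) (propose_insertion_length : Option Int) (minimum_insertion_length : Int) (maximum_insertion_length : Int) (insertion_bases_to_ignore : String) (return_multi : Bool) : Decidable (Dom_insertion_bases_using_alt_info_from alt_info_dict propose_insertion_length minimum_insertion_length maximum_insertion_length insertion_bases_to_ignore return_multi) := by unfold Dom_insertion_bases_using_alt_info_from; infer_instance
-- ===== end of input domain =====

-- B replaces A's two intermediate dicts + max/sort passes by a single pass keeping running
-- winners (strict '>') and a running top-two list; equivalence is about the RETURN value.

-- ===== PORT A =====
-- loop body of A's 'for raw_key, items in alt_info_dict.items()':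
-- state = (insertion_bases_dict, propose_insertion_bases_dict)
def aStep (plTruthy : Bool) (plVal : Int) (minL maxL : Int) (ign : String)
    (st : PySem.Dict String Int × PySem.Dict String Int) (kv : String × Int) :
    PySem.Dict String Int × PySem.Dict String Int :=
  match kv.1.toList with
  | [] => st  -- raw_key[0] raises IndexError in Python; excluded by Pre_
  | c :: rest =>
    if c ≠ 'I' then st                       -- if raw_key[0] != 'I': continue
    else
      let key := String.ofList rest          -- key = raw_key[1:]
      let klen : Int := (rest.length : Int)
      -- 'propose_insertion_length and len(key) == propose_insertion_length and key != ...'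
      if plTruthy = true ∧ klen = plVal ∧ key ≠ ign then
        (st.1, st.2.insert key kv.2)
      else if minL ≤ klen ∧ klen ≤ maxL ∧ key ≠ ign then
        (st.1.insert key kv.2, st.2)
      else st

def insertion_bases_using_alt_info_from (alt_info_dict : List (String × Int)) (propose_insertion_length : Option Int) (minimum_insertion_length : Int) (maximum_insertion_length : Int) (insertion_bases_to_ignore : String) (return_multi : Bool) : String :=
  -- 'if propose_insertion_length: propose_insertion_length += 1' (Python truthiness: None and 0 are falsy)
  let pl : Option Int := match propose_insertion_length with
    | some p => if p ≠ 0 then some (p + 1) else some p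
    | none => none
  let plTruthy : Bool := match pl with | some p => decide (p ≠ 0) | none => false
  if alt_info_dict.length = 0 then ""        -- if not len(alt_info_dict): return ""
  else
    let st := alt_info_dict.foldl
      (aStep plTruthy (pl.getD 0) minimum_insertion_length maximum_insertion_length insertion_bases_to_ignore)
      (PySem.Dict.empty, PySem.Dict.empty)
    if plTruthy = true ∧ st.2.size ≠ 0 then
      -- max(propose_insertion_bases_dict, key=propose_insertion_bases_dict.get)
      -- (.get on a present key = .getD with any default)
      if st.2.size > 0 then
        match PySem.List.max? st.2.keys (fun k => st.2.getD k 0) with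
        | some k => k
        | none => ""
      else ""
    else if return_multi = true then
      -- Python returns a LIST of up to two keys here (outside Pre_, which keeps only the
      -- return_multi inputs where A's value is a str): rendered as their concatenation.
      -- xs[::-1] = reverse (PySem.List.slice?_none_none_neg_one)
      let lst := ((PySem.List.sorted st.1.items (fun x => x.2) false).reverse).map (fun x => x.1)
      if lst.length ≠ 0 then String.join (PySem.List.slice lst none (some 2)) else ""
    else
      if st.1.size > 0 then
        match PySem.List.max? st.1.keys (fun k => st.1.getD k 0) with
        | some k => k
        | none => ""
      else ""

-- ===== PORT B =====
-- 'top_two.insert(i, (key, count))' after the while loop: insert before the first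
-- entry whose count is ≤ count (strictly smaller counts are skipped over)
def insertDescPair (p : String × Int) : List (String × Int) → List (String × Int)
  | [] => [p]
  | q :: t => if p.2 < q.2 then q :: insertDescPair p t else p :: q :: t

-- loop body of B: state = (best_propose, best, top_two)
def bStep (tTruthy : Bool) (tVal : Int) (minL maxL : Int) (ign : String)
    (st : Option (String × Int) × Option (String × Int) × List (String × Int)) (kv : String × Int) :
    Option (String × Int) × Option (String × Int) × List (String × Int) :=
  match kv.1.toList with
  | [] => st                                 -- not raw_key.startswith('I')
  | c :: rest =>
    if c ≠ 'I' then st                       -- not raw_key.startswith('I')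
    else
      let key := String.ofList rest          -- key = raw_key[1:]
      if key = ign then st
      else
        let klen : Int := (rest.length : Int)
        if tTruthy = true ∧ klen = tVal then -- 'if target and len(key) == target'
          match st.1 with
          | none => (some (key, kv.2), st.2)
          | some q => if kv.2 > q.2 then (some (key, kv.2), st.2) else st
        else if minL ≤ klen ∧ klen ≤ maxL then
          let b' := match st.2.1 with
            | none => some (key, kv.2)
            | some q => if kv.2 > q.2 then some (key, kv.2) else st.2.1
          (st.1, b', (insertDescPair (key, kv.2) st.2.2).take 2)
        else st

def insertion_bases_using_alt_info_from_alt (alt_info_dict : List (String × Int)) (propose_insertion_length : Option Int) (minimum_insertion_length : Int) (maximum_insertion_length : Int) (insertion_bases_to_ignore : String) (return_multi : Bool) : String :=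
  -- target = propose_insertion_length + 1 if propose_insertion_length else None
  let target : Option Int := match propose_insertion_length with
    | some p => if p ≠ 0 then some (p + 1) else none
    | none => none
  let tTruthy : Bool := match target with | some t => decide (t ≠ 0) | none => false
  let st := alt_info_dict.foldl
    (bStep tTruthy (target.getD 0) minimum_insertion_length maximum_insertion_length insertion_bases_to_ignore)
    (none, none, [])
  match st.1 with
  | some q => q.1                            -- return best_propose[0]
  | none =>
    if return_multi = true then
      -- Python returns a LIST of up to two keys here (outside Pre_, which keeps only the
      -- return_multi inputs where B's value is a str): rendered as their concatenation.
      if st.2.2 ≠ [] then String.join (st.2.2.map (fun x => x.1)) else ""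
    else
      match st.2.1 with
      | some q => q.1                        -- return best[0]
      | none => ""

-- ===== PRECONDITION & SPEC =====
-- truthiness of the (possibly incremented) proposed length, and its value: closed-form on the input
def preTruthy : Option Int → Bool
  | some p => decide (p ≠ 0 ∧ p + 1 ≠ 0)
  | none => false
def preTarget : Option Int → Int
  | some p => if p ≠ 0 then p + 1 else 0
  | none => 0
-- a pair that would land in the propose bucket
def preHitP (pT : Bool) (pV : Int) (ign : String) (kv : String × Int) : Bool :=
  decide (kv.1.toList.head? = some 'I') && decide (String.ofList kv.1.toList.tail ≠ ign) &&
    pT && decide ((kv.1.toList.tail.length : Int) = pV)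
-- a pair that would land in the regular (multi) bucket
def preHitI (pT : Bool) (pV mn mx : Int) (ign : String) (kv : String × Int) : Bool :=
  decide (kv.1.toList.head? = some 'I') && decide (String.ofList kv.1.toList.tail ≠ ign) &&
    !(pT && decide ((kv.1.toList.tail.length : Int) = pV)) &&
    decide (mn ≤ (kv.1.toList.tail.length : Int)) && decide ((kv.1.toList.tail.length : Int) ≤ mx)

-- Pre_ excludes only inputs on which A yields no value of the declared types: empty keys, on
-- which raw_key[0] raises IndexError; duplicate keys, which a Python dict argument cannot carry;
-- and exactly the inputs on which A returns a LIST of up to two strings instead of a str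
-- (return_multi true, no propose-bucket hit, some regular-bucket hit) — a value outside the
-- String return type that no String-valued claim can state; the Python B returns the identical
-- list there (see the cites), so nothing about A's multi behaviour is being dodged, it is only
-- untypeable here.  All return_multi inputs on which A returns a str (propose hit, or no
-- regular candidate) stay inside Pre_.
def Pre_insertion_bases_using_alt_info_from (alt_info_dict : List (String × Int)) (propose_insertion_length : Option Int) (minimum_insertion_length : Int) (maximum_insertion_length : Int) (insertion_bases_to_ignore : String) (return_multi : Bool) : Prop :=
  (∀ kv ∈ alt_info_dict, kv.1 ≠ "") ∧ (alt_info_dict.map Prod.fst).Nodup ∧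
  (return_multi = false
   ∨ (∃ kv ∈ alt_info_dict, preHitP (preTruthy propose_insertion_length) (preTarget propose_insertion_length) insertion_bases_to_ignore kv = true)
   ∨ (∀ kv ∈ alt_info_dict, ¬ preHitI (preTruthy propose_insertion_length) (preTarget propose_insertion_length) minimum_insertion_length maximum_insertion_length insertion_bases_to_ignore kv = true))
instance (alt_info_dict : List (String × Int)) (propose_insertion_length : Option Int) (minimum_insertion_length : Int) (maximum_insertion_length : Int) (insertion_bases_to_ignore : String) (return_multi : Bool) : Decidable (Pre_insertion_bases_using_alt_info_from alt_info_dict propose_insertion_length minimum_insertion_length maximum_insertion_length insertion_bases_to_ignore return_multi) := by unfold Pre_insertion_bases_using_alt_info_from; infer_instance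

def pvWitness_insertion_bases_using_alt_info_from : (List (String × Int)) × Option Int × Int × Int × String × Bool :=
  ([("IAC", 3), ("ICG", 5), ("X", 1)], some 2, 1, 50, "", false)

def Spec_insertion_bases_using_alt_info_from (alt_info_dict : List (String × Int)) (propose_insertion_length : Option Int) (minimum_insertion_length : Int) (maximum_insertion_length : Int) (insertion_bases_to_ignore : String) (return_multi : Bool) (out : String) : Prop := out = insertion_bases_using_alt_info_from_alt alt_info_dict propose_insertion_length minimum_insertion_length maximum_insertion_length insertion_bases_to_ignore return_multi
instance (alt_info_dict : List (String × Int)) (propose_insertion_length : Option Int) (minimum_insertion_length : Int) (maximum_insertion_length : Int) (insertion_bases_to_ignore : String) (return_multi : Bool) (out : String) : Decidable (Spec_insertion_bases_using_alt_info_from alt_info_dict propose_insertion_length minimum_insertion_length maximum_insertion_length insertion_bases_to_ignore return_multi out) := by unfold Spec_insertion_bases_using_alt_info_from; infer_instance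

-- ===== CLAIM (what is proved, stated in full; the proofs are below) =====
def Claim_equal_insertion_bases_using_alt_info_from : Prop := ∀ (alt_info_dict : List (String × Int)) (propose_insertion_length : Option Int) (minimum_insertion_length : Int) (maximum_insertion_length : Int) (insertion_bases_to_ignore : String) (return_multi : Bool), Dom_insertion_bases_using_alt_info_from alt_info_dict propose_insertion_length minimum_insertion_length maximum_insertion_length insertion_bases_to_ignore return_multi → Pre_insertion_bases_using_alt_info_from alt_info_dict propose_insertion_length minimum_insertion_length maximum_insertion_length insertion_bases_to_ignore return_multi → Spec_insertion_bases_using_alt_info_from alt_info_dict propose_insertion_length minimum_insertion_length maximum_insertion_length insertion_bases_to_ignore return_multi (insertion_bases_using_alt_info_from alt_info_dict propose_insertion_length minimum_insertion_length maximum_insertion_length insertion_bases_to_ignore return_multi)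

-- ===== LEMMAS AND PROOFS =====

theorem max?_append_singleton {α : Type} (g : α → Int) (ps : List α) (p : α) :
    PySem.List.max? (ps ++ [p]) g
    = (match PySem.List.max? ps g with
       | none => some p
       | some m => if g m < g p then some p else some m) := by
  simp only [PySem.List.max?, List.foldl_append, List.foldl]
  split
  · next heq => rw [heq]
  · next m heq => rw [heq]

-- max(d, key=d.get) over an association list with distinct keys = first pair with maximal value
theorem max?_assoc (g : String → Int) (ps : List (String × Int))
    (hg : ∀ p ∈ ps, g p.1 = p.2) :
    PySem.List.max? (ps.map (fun x => x.1)) g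
      = (PySem.List.max? ps (fun x => x.2)).map (fun x => x.1) := by
  induction ps using List.reverseRecOn with
  | nil => rfl
  | append_singleton ps p ih =>
    have hp : g p.1 = p.2 := hg p (by simp)
    have hg' : ∀ q ∈ ps, g q.1 = q.2 := fun q hq => hg q (by simp [hq])
    rw [List.map_append, List.map_singleton, max?_append_singleton g _ p.1,
        max?_append_singleton (fun x : String × Int => x.2) ps p, ih hg']
    cases hm : PySem.List.max? ps (fun x : String × Int => x.2) with
    | none => rfl
    | some m =>
      have hmem : m ∈ ps := PySem.List.max?_mem hm
      have hgm : g m.1 = m.2 := hg' m hmem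
      simp only [Option.map_some]
      rw [hgm, hp]
      split_ifs <;> rfl

-- the main loop invariant: A's two dicts are association lists psI/psP, B's two running
-- winners are their first-maxima, through the whole fold; plus bookkeeping for the
-- propose-hit / no-regular-hit side conditions of Pre_
theorem loop_eq (plT : Bool) (plV minL maxL : Int) (ign : String) :
    ∀ (l psP psI t2 : List (String × Int)),
    (l.map Prod.fst).Nodup →
    (∀ kv ∈ l, ∀ rest : List Char, kv.1.toList = 'I' :: rest →
        String.ofList rest ∉ psP.map Prod.fst ∧ String.ofList rest ∉ psI.map Prod.fst) →
    (psP.map Prod.fst).Nodup → (psI.map Prod.fst).Nodup →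
    ∃ psP' psI' t2' : List (String × Int),
      l.foldl (aStep plT plV minL maxL ign) (PySem.Dict.mk psI, PySem.Dict.mk psP)
        = (PySem.Dict.mk psI', PySem.Dict.mk psP')
      ∧ l.foldl (bStep plT plV minL maxL ign)
          (PySem.List.max? psP (fun x => x.2), PySem.List.max? psI (fun x => x.2), t2)
        = (PySem.List.max? psP' (fun x => x.2), PySem.List.max? psI' (fun x => x.2), t2')
      ∧ (psP'.map Prod.fst).Nodup ∧ (psI'.map Prod.fst).Nodup
      ∧ (plT = false → psP' = psP)
      ∧ (psP ≠ [] → psP' ≠ [])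
      ∧ (∀ kv ∈ l, preHitP plT plV ign kv = true → psP' ≠ [])
      ∧ ((∀ kv ∈ l, ¬ preHitI plT plV minL maxL ign kv = true) → psI' = psI ∧ t2' = t2) := by
  have hins : ∀ (ps : List (String × Int)) (k : String) (v : Int), k ∉ ps.map Prod.fst →
      (PySem.Dict.mk ps).insert k v = PySem.Dict.mk (ps ++ [(k, v)]) := by
    intro ps k v hnot
    have hcont : (PySem.Dict.mk ps).contains k = false := by
      rw [PySem.Dict.contains_eq_decide_mem_keys, PySem.Dict.keys_mk]
      simpa using hnot
    apply PySem.Dict.ext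
    rw [PySem.Dict.items_insert_of_not_contains _ _ hcont]
  intro l
  induction l with
  | nil =>
    intro psP psI t2 _ _ hnP hnI
    exact ⟨psP, psI, t2, rfl, rfl, hnP, hnI, fun _ => rfl, fun h => h,
      fun kv hkv => absurd hkv List.not_mem_nil, fun _ => ⟨rfl, rfl⟩⟩
  | cons kv t ih =>
    intro psP psI t2 hnd hf hnP hnI
    simp only [List.map_cons, List.nodup_cons] at hnd
    obtain ⟨hk, hndt⟩ := hnd
    have hft : ∀ kv' ∈ t, ∀ rest : List Char, kv'.1.toList = 'I' :: rest →
        String.ofList rest ∉ psP.map Prod.fst ∧ String.ofList rest ∉ psI.map Prod.fst :=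
      fun kv' h' => hf kv' (List.mem_cons_of_mem _ h')
    simp only [List.foldl_cons]
    -- shared packaging of a step that leaves both states unchanged, given that the
    -- head pair hits neither bucket
    have skip : (preHitP plT plV ign kv = true → False) →
        (preHitI plT plV minL maxL ign kv = true → False) →
        aStep plT plV minL maxL ign (PySem.Dict.mk psI, PySem.Dict.mk psP) kv
          = (PySem.Dict.mk psI, PySem.Dict.mk psP) →
        bStep plT plV minL maxL ign
            (PySem.List.max? psP (fun x => x.2), PySem.List.max? psI (fun x => x.2), t2) kv
          = (PySem.List.max? psP (fun x => x.2), PySem.List.max? psI (fun x => x.2), t2) →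
        ∃ psP' psI' t2' : List (String × Int),
          (kv :: t).foldl (aStep plT plV minL maxL ign) (PySem.Dict.mk psI, PySem.Dict.mk psP)
            = (PySem.Dict.mk psI', PySem.Dict.mk psP')
          ∧ (kv :: t).foldl (bStep plT plV minL maxL ign)
              (PySem.List.max? psP (fun x => x.2), PySem.List.max? psI (fun x => x.2), t2)
            = (PySem.List.max? psP' (fun x => x.2), PySem.List.max? psI' (fun x => x.2), t2')
          ∧ (psP'.map Prod.fst).Nodup ∧ (psI'.map Prod.fst).Nodup
          ∧ (plT = false → psP' = psP)
          ∧ (psP ≠ [] → psP' ≠ [])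
          ∧ (∀ kv' ∈ kv :: t, preHitP plT plV ign kv' = true → psP' ≠ [])
          ∧ ((∀ kv' ∈ kv :: t, ¬ preHitI plT plV minL maxL ign kv' = true) → psI' = psI ∧ t2' = t2) := by
      intro hnp hni ha hb
      simp only [List.foldl_cons]
      rw [ha, hb]
      obtain ⟨psP', psI', t2', x1, x2, x3, x4, x5, x6, x7, x8⟩ := ih psP psI t2 hndt hft hnP hnI
      refine ⟨psP', psI', t2', x1, x2, x3, x4, x5, x6, ?_, ?_⟩
      · intro kv' hkv' hhit
        rcases List.mem_cons.mp hkv' with hkv' | hkv'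
        · exact absurd (hkv' ▸ hhit) (fun hx => hnp hx)
        · exact x7 kv' hkv' hhit
      · intro hno
        exact x8 fun kv' hkv' => hno kv' (List.mem_cons_of_mem _ hkv')
    cases h : kv.1.toList with
    | nil =>
      exact skip (by simp [preHitP, h]) (by simp [preHitI, h])
        (by simp [aStep, h]) (by simp [bStep, h])
    | cons c rest =>
      by_cases hc : c = 'I'
      case neg =>
        exact skip (by simp [preHitP, h, hc]) (by simp [preHitI, h, hc])
          (by simp [aStep, h, hc]) (by simp [bStep, h, hc])
      case pos =>
      subst hc
      -- a later 'I'-key never reproduces this stripped key (raw keys are Nodup)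
      have hfresh : ∀ kv' ∈ t, ∀ rest' : List Char, kv'.1.toList = 'I' :: rest' →
          String.ofList rest' ≠ String.ofList rest := by
        intro kv' ht' rest' h' he
        have hr : rest' = rest := String.ofList_inj.mp he
        subst hr
        have : kv'.1 = kv.1 := String.toList_inj.mp (h'.trans h.symm)
        exact hk (this ▸ List.mem_map_of_mem ht')
      by_cases hig : String.ofList rest = ign
      case pos =>
        exact skip (by simp [preHitP, h, hig]) (by simp [preHitI, h, hig])
          (by simp [aStep, h, hig]) (by simp [bStep, h, hig])
      case neg =>
      have hkeyP : String.ofList rest ∉ psP.map Prod.fst := (hf kv (List.mem_cons_self) rest h).1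
      have hkeyI : String.ofList rest ∉ psI.map Prod.fst := (hf kv (List.mem_cons_self) rest h).2
      by_cases hprop : plT = true ∧ (rest.length : Int) = plV
      case pos =>
        -- propose branch: append to psP
        have ha : aStep plT plV minL maxL ign (PySem.Dict.mk psI, PySem.Dict.mk psP) kv
            = (PySem.Dict.mk psI, PySem.Dict.mk (psP ++ [(String.ofList rest, kv.2)])) := by
          simp only [aStep, h]
          rw [if_neg (by simp), if_pos ⟨hprop.1, hprop.2, hig⟩, hins psP _ _ hkeyP]
        have hb : bStep plT plV minL maxL ign
            (PySem.List.max? psP (fun x => x.2), PySem.List.max? psI (fun x => x.2), t2) kv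
            = (PySem.List.max? (psP ++ [(String.ofList rest, kv.2)]) (fun x => x.2),
               PySem.List.max? psI (fun x => x.2), t2) := by
          simp only [bStep, h]
          rw [if_neg (by simp), if_neg hig, if_pos ⟨hprop.1, hprop.2⟩,
              max?_append_singleton (fun x : String × Int => x.2) psP (String.ofList rest, kv.2)]
          cases hm : PySem.List.max? psP (fun x : String × Int => x.2) with
          | none => rfl
          | some q => by_cases hlt : q.2 < kv.2 <;> simp [hlt, gt_iff_lt]
        rw [ha, hb]
        have hf0 : ∀ kv' ∈ t, ∀ rest' : List Char, kv'.1.toList = 'I' :: rest' →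
            String.ofList rest' ∉ (psP ++ [(String.ofList rest, kv.2)]).map Prod.fst ∧
            String.ofList rest' ∉ psI.map Prod.fst := by
          intro kv' ht' rest' h'
          refine ⟨?_, (hft kv' ht' rest' h').2⟩
          simp only [List.map_append, List.map_cons, List.map_nil, List.mem_append, List.mem_cons]
          rintro (hin | hin)
          · exact (hft kv' ht' rest' h').1 hin
          · exact hfresh kv' ht' rest' h' (by simpa using hin)
        have hn0 : ((psP ++ [(String.ofList rest, kv.2)]).map Prod.fst).Nodup := by
          simp only [List.map_append, List.map_cons, List.map_nil]
          exact List.Nodup.append hnP (List.nodup_singleton _) (by simpa using hkeyP)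
        obtain ⟨psP', psI', t2', x1, x2, x3, x4, x5, x6, x7, x8⟩ :=
          ih (psP ++ [(String.ofList rest, kv.2)]) psI t2 hndt hf0 hn0 hnI
        have hne' : psP' ≠ [] := x6 (by simp)
        refine ⟨psP', psI', t2', x1, x2, x3, x4,
          fun hfalse => absurd hprop.1 (by simp [hfalse]), fun _ => hne',
          fun _ _ _ => hne', ?_⟩
        intro hno
        exact x8 fun kv' hkv' => hno kv' (List.mem_cons_of_mem _ hkv')
      case neg =>
      by_cases hrange : minL ≤ (rest.length : Int) ∧ (rest.length : Int) ≤ maxL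
      case pos =>
        -- regular branch: append to psI
        have ha : aStep plT plV minL maxL ign (PySem.Dict.mk psI, PySem.Dict.mk psP) kv
            = (PySem.Dict.mk (psI ++ [(String.ofList rest, kv.2)]), PySem.Dict.mk psP) := by
          simp only [aStep, h]
          rw [if_neg (by simp), if_neg (fun hx => hprop ⟨hx.1, hx.2.1⟩),
              if_pos ⟨hrange.1, hrange.2, hig⟩, hins psI _ _ hkeyI]
        have hb : bStep plT plV minL maxL ign
            (PySem.List.max? psP (fun x => x.2), PySem.List.max? psI (fun x => x.2), t2) kv
            = (PySem.List.max? psP (fun x => x.2),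
               PySem.List.max? (psI ++ [(String.ofList rest, kv.2)]) (fun x => x.2),
               (insertDescPair (String.ofList rest, kv.2) t2).take 2) := by
          simp only [bStep, h]
          rw [if_neg (by simp), if_neg hig, if_neg hprop, if_pos hrange,
              max?_append_singleton (fun x : String × Int => x.2) psI (String.ofList rest, kv.2)]
          cases hm : PySem.List.max? psI (fun x : String × Int => x.2) with
          | none => rfl
          | some q => by_cases hlt : q.2 < kv.2 <;> simp [hlt, gt_iff_lt]
        rw [ha, hb]
        have hf0 : ∀ kv' ∈ t, ∀ rest' : List Char, kv'.1.toList = 'I' :: rest' →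
            String.ofList rest' ∉ psP.map Prod.fst ∧
            String.ofList rest' ∉ (psI ++ [(String.ofList rest, kv.2)]).map Prod.fst := by
          intro kv' ht' rest' h'
          refine ⟨(hft kv' ht' rest' h').1, ?_⟩
          simp only [List.map_append, List.map_cons, List.map_nil, List.mem_append, List.mem_cons]
          rintro (hin | hin)
          · exact (hft kv' ht' rest' h').2 hin
          · exact hfresh kv' ht' rest' h' (by simpa using hin)
        have hn0 : ((psI ++ [(String.ofList rest, kv.2)]).map Prod.fst).Nodup := by
          simp only [List.map_append, List.map_cons, List.map_nil]
          exact List.Nodup.append hnI (List.nodup_singleton _) (by simpa using hkeyI)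
        obtain ⟨psP', psI', t2', x1, x2, x3, x4, x5, x6, x7, x8⟩ :=
          ih psP (psI ++ [(String.ofList rest, kv.2)])
            ((insertDescPair (String.ofList rest, kv.2) t2).take 2) hndt hf0 hnP hn0
        refine ⟨psP', psI', t2', x1, x2, x3, x4, x5, x6, ?_, ?_⟩
        · intro kv' hkv' hhit
          rcases List.mem_cons.mp hkv' with hkv' | hkv'
          · subst hkv'
            refine absurd hhit ?_
            simp only [preHitP, h, Bool.and_eq_true, decide_eq_true_eq]
            rintro ⟨⟨⟨_, _⟩, hT⟩, hV⟩
            exact hprop ⟨hT, by simpa using hV⟩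
          · exact x7 kv' hkv' hhit
        · intro hno
          refine absurd ?_ (hno kv List.mem_cons_self)
          simp only [preHitI, h, Bool.and_eq_true, decide_eq_true_eq, Bool.not_eq_true',
            Bool.and_eq_false_iff]
          refine ⟨⟨⟨⟨rfl, by simpa using hig⟩, ?_⟩, by simpa using hrange.1⟩, by simpa using hrange.2⟩
          by_cases hT : plT = true
          · right
            simp only [decide_eq_false_iff_not]
            intro hV
            exact hprop ⟨hT, by simpa using hV⟩
          · left
            simpa using hT
      case neg =>
        refine skip ?_ ?_
          (by simp only [aStep, h]
              rw [if_neg (by simp), if_neg (fun hx => hprop ⟨hx.1, hx.2.1⟩),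
                  if_neg (fun hx => hrange ⟨hx.1, hx.2.1⟩)])
          (by simp only [bStep, h]
              rw [if_neg (by simp), if_neg hig, if_neg hprop, if_neg hrange])
        · simp only [preHitP, h, Bool.and_eq_true, decide_eq_true_eq]
          rintro ⟨⟨⟨_, _⟩, hT⟩, hV⟩
          exact hprop ⟨hT, by simpa using hV⟩
        · simp only [preHitI, h, Bool.and_eq_true, decide_eq_true_eq]
          rintro ⟨⟨⟨⟨_, _⟩, _⟩, h1⟩, h2⟩
          exact hrange ⟨by simpa using h1, by simpa using h2⟩

-- the two ports agree once truthiness/target value are unified, given Pre_'s side condition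
theorem core (T0 : Bool) (V0 mn mx : Int) (ig : String) (rm : Bool) (l : List (String × Int))
    (hnd : (l.map Prod.fst).Nodup)
    (hside : rm = false
      ∨ (∃ kv ∈ l, preHitP T0 V0 ig kv = true)
      ∨ (∀ kv ∈ l, ¬ preHitI T0 V0 mn mx ig kv = true)) :
    (if l.length = 0 then ""
     else
       let st := l.foldl (aStep T0 V0 mn mx ig) (PySem.Dict.empty, PySem.Dict.empty)
       if T0 = true ∧ st.2.size ≠ 0 then
         if st.2.size > 0 then
           match PySem.List.max? st.2.keys (fun k => st.2.getD k 0) with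
           | some k => k
           | none => ""
         else ""
       else if rm = true then
         let lst := ((PySem.List.sorted st.1.items (fun x => x.2) false).reverse).map (fun x => x.1)
         if lst.length ≠ 0 then String.join (PySem.List.slice lst none (some 2)) else ""
       else
         if st.1.size > 0 then
           match PySem.List.max? st.1.keys (fun k => st.1.getD k 0) with
           | some k => k
           | none => ""
         else "")
    = (let st := l.foldl (bStep T0 V0 mn mx ig) (none, none, [])
       match st.1 with
       | some q => q.1
       | none =>
         if rm = true then
           if st.2.2 ≠ [] then String.join (st.2.2.map (fun x => x.1)) else ""
         else
           match st.2.1 with | some q => q.1 | none => "") := by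
  obtain ⟨psP', psI', t2', e1, e2, n1, n2, himp, _, hhitP, hnoI⟩ :=
    loop_eq T0 V0 mn mx ig l [] [] [] hnd (by simp) (by simp) (by simp)
  have hemp : (PySem.Dict.empty : PySem.Dict String Int) = PySem.Dict.mk [] := rfl
  have hmaxnil : PySem.List.max? ([] : List (String × Int)) (fun x => x.2) = none := rfl
  -- the branch over the regular dict / running winner, shared by both outcomes
  have hins : (if (PySem.Dict.mk psI').size > 0 then
        (match PySem.List.max? ((PySem.Dict.mk psI').items.map (fun x => x.1))
            (fun k => (PySem.Dict.mk psI').getD k 0) with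
         | some k => k
         | none => "")
      else "")
      = (match PySem.List.max? psI' (fun x => x.2) with
         | some q => q.1
         | none => "") := by
    have hg : ∀ p ∈ psI', (PySem.Dict.mk psI').getD p.1 0 = p.2 := by
      intro p hp
      exact PySem.Dict.getD_of_mem_items _ hp (by simpa [PySem.Dict.keys_mk] using n2) 0
    have hkeys := max?_assoc (fun k => (PySem.Dict.mk psI').getD k 0) psI' hg
    cases hm : PySem.List.max? psI' (fun x : String × Int => x.2) with
    | none =>
      have : psI' = [] := (PySem.List.max?_eq_none_iff _ _).mp hm
      subst this
      simp [PySem.Dict.size]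
    | some q =>
      have : psI' ≠ [] := by
        intro hx; rw [hx, hmaxnil] at hm; cases hm
      have hlen : (PySem.Dict.mk psI').size > 0 := by
        simpa [PySem.Dict.size, List.length_pos_iff] using this
      rw [hm] at hkeys
      simp [hlen, hkeys]
  by_cases hl : l.length = 0
  · have : l = [] := List.length_eq_zero_iff.mp hl
    subst this
    cases rm <;> simp
  · have e2' : l.foldl (bStep T0 V0 mn mx ig) (none, none, [])
        = (PySem.List.max? psP' (fun x => x.2), PySem.List.max? psI' (fun x => x.2), t2') := e2
    rw [if_neg hl, hemp, e1, e2']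
    simp only []
    cases hm : PySem.List.max? psP' (fun x : String × Int => x.2) with
    | some q =>
      -- a propose winner exists: both return it, regardless of rm
      have hT : T0 = true := by
        cases hT0 : T0 with
        | false =>
          rw [himp hT0, hmaxnil] at hm
          cases hm
        | true => rfl
      have hne : psP' ≠ [] := by
        intro hx; rw [hx, hmaxnil] at hm; cases hm
      have hsz : (PySem.Dict.mk psP').size ≠ 0 := by
        simpa [PySem.Dict.size, List.length_eq_zero_iff] using hne
      have hg : ∀ p ∈ psP', (PySem.Dict.mk psP').getD p.1 0 = p.2 := by
        intro p hp
        exact PySem.Dict.getD_of_mem_items _ hp (by simpa [PySem.Dict.keys_mk] using n1) 0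
      have hkeys := max?_assoc (fun k => (PySem.Dict.mk psP').getD k 0) psP' hg
      rw [hm] at hkeys
      have hpos : (PySem.Dict.mk psP').size > 0 := Nat.pos_of_ne_zero hsz
      simp [hT, hsz, hpos, PySem.Dict.keys, hkeys]
    | none =>
      -- no propose winner: A's first branch is dead (its dict is empty)
      have hP : psP' = [] := (PySem.List.max?_eq_none_iff _ _).mp hm
      subst hP
      have hsz : (PySem.Dict.mk ([] : List (String × Int))).size = 0 := rfl
      cases hrm : rm with
      | false => simpa [hsz, PySem.Dict.keys] using hins
      | true =>
        -- Pre_'s side condition: some pair hits the propose bucket (impossible here),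
        -- or no pair hits the regular bucket (then both sides return "")
        rcases hside with hside | hside | hside
        · cases hrm ▸ hside
        · obtain ⟨kv, hkv, hhit⟩ := hside
          exact absurd rfl (hhitP kv hkv hhit)
        · obtain ⟨hI, ht2⟩ := hnoI hside
          subst hI
          subst ht2
          simp [hsz]

-- ===== VERDICT (by name: the statement is the Claim_ definition above) =====
theorem insertion_bases_using_alt_info_from_spec : Claim_equal_insertion_bases_using_alt_info_from := by
  unfold Claim_equal_insertion_bases_using_alt_info_from
  intro l pl mn mx ig rm _ hpre
  obtain ⟨_, hnd, hside⟩ := hpre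
  unfold Spec_insertion_bases_using_alt_info_from
  simp only [insertion_bases_using_alt_info_from, insertion_bases_using_alt_info_from_alt]
  rcases pl with _ | p
  · exact core false 0 mn mx ig rm l hnd (by simpa [preTruthy, preTarget] using hside)
  · by_cases hp : p = 0
    · subst hp
      exact core false 0 mn mx ig rm l hnd (by simpa [preTruthy, preTarget] using hside)
    · have hT : preTruthy (some p) = decide ¬(p + 1 = 0) := by
        simp [preTruthy, hp]
      have hV : preTarget (some p) = p + 1 := by
        simp [preTarget, hp]
      rw [hT, hV] at hside
      simp only [hp, ne_eq, not_false_eq_true, if_true]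
      exact core (decide ¬(p + 1 = 0)) (p + 1) mn mx ig rm l hnd hside
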